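-- pv_equiv track=rewrite | github.com/arckanano/ifpi-ads-algoritmos2020 | HackerHank/strongPassword.py | has_special
-- ===== SOURCE A (Python) =====
-- def has_special(senha):
--     special_characters = "!@#$%^&*()-+"
--     for i in range(len(senha)):
--         tot = 0
--         if senha[i] in special_characters:
--             tot += 1
--             if tot >= 1:
--                 return True
--
--     return False
-- ===== SOURCE B (Python) =====
-- def has_special(senha):
--     special_characters = "!@#$%^&*()-+"
--     return bool(set(senha) & set(special_characters))
-- ===== Notes on version B (the rewrite author's own statement) =====
-- stated objective: simpler
-- what changed: Replaces the explicit index loop with per-character early exit by building the set of the password's characters and intersecting it with the set of special characters, returning whether the intersection is nonempty.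
import Mathlib
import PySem

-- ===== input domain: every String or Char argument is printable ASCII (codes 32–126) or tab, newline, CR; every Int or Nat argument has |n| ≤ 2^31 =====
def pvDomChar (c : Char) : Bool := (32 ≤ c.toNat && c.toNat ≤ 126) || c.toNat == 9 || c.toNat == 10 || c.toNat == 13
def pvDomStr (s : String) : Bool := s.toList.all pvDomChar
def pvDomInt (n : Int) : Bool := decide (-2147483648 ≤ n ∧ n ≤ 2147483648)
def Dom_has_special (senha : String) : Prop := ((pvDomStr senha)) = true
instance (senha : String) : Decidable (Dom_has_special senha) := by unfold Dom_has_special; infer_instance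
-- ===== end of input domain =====

-- B replaces A's index loop with a set intersection (chars of the password ∩ special chars); objective: simpler.


-- ===== PORT A =====
-- the 'for i in range(len(senha))' loop with its early 'return True'; tot is reset to 0 each iteration
def has_special_go (cs special : List Char) (i : Nat) : Bool :=
  if h : i < cs.length then
    let tot : Int := 0
    if PySem.Chars.isIn [cs[i]] special then   -- 'senha[i] in special_characters' (single-char substring test)
      let tot := tot + 1
      if tot ≥ 1 then true else has_special_go cs special (i + 1)
    else has_special_go cs special (i + 1)
  else false
termination_by cs.length - i

def has_special (senha : String) : Bool :=
  let special_characters := "!@#$%^&*()-+"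
  has_special_go senha.toList special_characters.toList 0

-- ===== PORT B =====
-- bool(set(senha) & set(special_characters))
def has_special_alt (senha : String) : Bool :=
  let special_characters := "!@#$%^&*()-+"
  !(PySem.Set.inter (PySem.Set.ofList senha.toList)
      (PySem.Set.ofList special_characters.toList)).isEmpty

-- ===== PRECONDITION & SPEC =====
def Spec_has_special (senha : String) (out : Bool) : Prop := out = has_special_alt senha
instance (senha : String) (out : Bool) : Decidable (Spec_has_special senha out) := by unfold Spec_has_special; infer_instance

-- ===== CLAIM (what is proved, stated in full; the proofs are below) =====
def Claim_equal_has_special : Prop := ∀ (senha : String), Dom_has_special senha → Spec_has_special senha (has_special senha)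

-- ===== LEMMAS AND PROOFS =====

-- single-character 'in' on a string is membership
lemma isIn_singleton (c : Char) (s : List Char) :
    PySem.Chars.isIn [c] s = s.contains c := by
  by_cases h : c ∈ s
  · simp [(PySem.Chars.isIn_iff_infix _ _).2 ((List.singleton_infix_iff c s).mpr h), h]
  · have : ¬ [c] <:+: s := fun hin => h (hin.mem (List.mem_singleton_self c))
    simp [(PySem.Chars.isIn_eq_false_iff _ _).2 this, h]

-- A's loop from index i decides whether some char of cs.drop i is special
lemma has_special_go_eq (cs special : List Char) (i : Nat) :
    has_special_go cs special i = (cs.drop i).any (fun c => special.contains c) := by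
  by_cases h : i < cs.length
  · rw [has_special_go]
    have hd : cs.drop i = cs[i] :: cs.drop (i + 1) := List.drop_eq_getElem_cons h
    rw [hd]
    simp only [h, dif_pos, isIn_singleton, List.any_cons]
    simp [has_special_go_eq cs special (i + 1)]
  · rw [has_special_go]
    simp [h, List.drop_eq_nil_of_le (le_of_not_gt h)]
termination_by cs.length - i

-- B's intersection is nonempty iff some char of cs is special
lemma inter_isEmpty (cs special : List Char) :
    (PySem.Set.inter (PySem.Set.ofList cs) (PySem.Set.ofList special)).isEmpty
      = !(cs.any (fun c => special.contains c)) := by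
  rcases h : cs.any (fun c => special.contains c) with _ | _
  · simp only [List.any_eq_false] at h
    have : PySem.Set.inter (PySem.Set.ofList cs) (PySem.Set.ofList special) = [] := by
      apply List.eq_nil_iff_forall_not_mem.2
      intro x hx
      rw [PySem.Set.mem_inter] at hx
      exact absurd (by simpa using hx.2) (by simpa using h x (by simpa using hx.1))
    simp [this]
  · simp only [List.any_eq_true] at h
    obtain ⟨x, hx, hxs⟩ := h
    have : x ∈ PySem.Set.inter (PySem.Set.ofList cs) (PySem.Set.ofList special) := by
      rw [PySem.Set.mem_inter]
      exact ⟨by simpa using hx, by simpa using hxs⟩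
    simp
    intro hnil
    simp [hnil] at this

-- ===== VERDICT (by name: the statement is the Claim_ definition above) =====
theorem has_special_spec : Claim_equal_has_special := by
  intro senha _
  show _ = _
  simp only [has_special, has_special_alt]
  rw [has_special_go_eq, inter_isEmpty]
  simp
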